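-- pv_equiv track=rewrite | github.com/Fawreez/penerdjemah-bahasa-djadoel | translate.py | new_to_old
-- ===== SOURCE A (Python) =====
-- def new_to_old(sentence):
--     result = []
--     sentence = sentence.lower()
--
--     for i in range(len(sentence)):
--
--         if sentence[i] == "j":
--             result.append("dj")
--         elif sentence[i] == "u":
--             result.append("oe")
--         elif sentence[i] == "c":
--             result.append("tj")
--         elif sentence[i] == "n" and i+1 < len(sentence):
--             if sentence[i+1] == "y":
--                 result.append("nj")
--             else:
--                 result.append(sentence[i])
--         elif sentence[i] == "s" and i+1 < len(sentence):
--             if sentence[i+1] == "y":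
--                 result.append("sj")
--             else:
--                 result.append(sentence[i])
--         elif sentence[i] == "y" and (sentence[i-1] == "n" or sentence[i-1] == "s") and i-1 >= 0:
--             result.append("")
--         elif sentence[i] == "y":
--             result.append("j")
--         elif sentence[i] == "k" and i+1 < len(sentence):
--             if  sentence[i+1] == "h":
--                 result.append("ch")
--             else:
--                 result.append(sentence[i])
--         elif sentence[i] == "h" and sentence[i-1] == "k" and i-1 >= 0:
--             result.append("")
--         else:
--             result.append(sentence[i])
--
--     return "".join(w for w in result)
-- ===== SOURCE B (Python) =====
-- def new_to_old(sentence):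
--     # Table-driven greedy tokenizer: digraphs first, then single letters.
--     table = {"ny": "nj", "sy": "sj", "kh": "ch",
--              "j": "dj", "u": "oe", "c": "tj", "y": "j"}
--     s = sentence.lower()
--     out = []
--     i = 0
--     while i < len(s):
--         two = s[i:i + 2]
--         if two in table:
--             out.append(table[two])
--             i += 2
--         elif s[i] in table:
--             out.append(table[s[i]])
--             i += 1
--         else:
--             out.append(s[i])
--             i += 1
--     return "".join(out)
-- ===== Notes on version B (the rewrite author's own statement) =====
-- stated objective: alternative
-- what changed: Replaces A's per-index scan with lookahead/lookbehind context branches (emitting empty strings for consumed digraph halves) by a table-driven greedy tokenizer: a dict of digraph and single-letter replacements, with a while loop that consumes a two-character window first, else one character.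
import Mathlib
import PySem

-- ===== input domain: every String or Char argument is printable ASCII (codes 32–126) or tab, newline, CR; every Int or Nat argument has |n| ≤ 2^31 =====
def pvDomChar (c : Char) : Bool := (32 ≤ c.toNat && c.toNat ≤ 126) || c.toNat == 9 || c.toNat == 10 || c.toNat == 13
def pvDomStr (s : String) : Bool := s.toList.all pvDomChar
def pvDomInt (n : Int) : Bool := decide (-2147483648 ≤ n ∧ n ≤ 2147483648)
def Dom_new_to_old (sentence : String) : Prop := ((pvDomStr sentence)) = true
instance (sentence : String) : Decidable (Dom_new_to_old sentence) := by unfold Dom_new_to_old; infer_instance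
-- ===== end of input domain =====

-- B replaces A's index scan with context branches by a table-driven greedy tokenizer
-- (digraphs first, then single letters); same output, alternative structure.


-- ===== PORT A =====
-- one loop-body piece of A: what gets appended to `result` at index i
def pieceA (s : List Char) (i : Int) : List Char :=
  let c := PySem.List.pyGetD s i ' '
  if c = 'j' then ['d','j']
  else if c = 'u' then ['o','e']
  else if c = 'c' then ['t','j']
  else if c = 'n' ∧ i + 1 < (s.length : Int) then
    (if PySem.List.pyGetD s (i+1) ' ' = 'y' then ['n','j'] else [c])
  else if c = 's' ∧ i + 1 < (s.length : Int) then
    (if PySem.List.pyGetD s (i+1) ' ' = 'y' then ['s','j'] else [c])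
  else if c = 'y' ∧ (PySem.List.pyGetD s (i-1) ' ' = 'n' ∨ PySem.List.pyGetD s (i-1) ' ' = 's') ∧ i - 1 ≥ 0 then []
  else if c = 'y' then ['j']
  else if c = 'k' ∧ i + 1 < (s.length : Int) then
    (if PySem.List.pyGetD s (i+1) ' ' = 'h' then ['c','h'] else [c])
  else if c = 'h' ∧ PySem.List.pyGetD s (i-1) ' ' = 'k' ∧ i - 1 ≥ 0 then []
  else [c]

def new_to_old (sentence : String) : String :=
  let s := (PySem.Str.lower sentence).toList
  let result := (PySem.List.pyRange 0 (s.length : Int) 1).foldl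
      (fun acc i => acc ++ [pieceA s i]) ([] : List (List Char))
  String.ofList result.flatten   -- "".join of the collected pieces

-- ===== PORT B =====
-- the dict literal of Source B as an association list
def tableB : List (List Char × List Char) :=
  [(['n','y'], ['n','j']), (['s','y'], ['s','j']), (['k','h'], ['c','h']),
   (['j'], ['d','j']), (['u'], ['o','e']), (['c'], ['t','j']), (['y'], ['j'])]

-- first-match lookup in the table (dict membership + indexing)
def lookB : List (List Char × List Char) → List Char → Option (List Char)
  | [], _ => none
  | (a, b) :: rest, k => if a = k then some b else lookB rest k

-- the while loop of Source B: greedy scan, two-char window first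
def tokB : List Char → List Char
  | [] => []
  | c1 :: c2 :: rest =>
    match lookB tableB [c1, c2] with
    | some r => r ++ tokB rest
    | none => ((lookB tableB [c1]).getD [c1]) ++ tokB (c2 :: rest)
  | [c1] => (lookB tableB [c1]).getD [c1]

def new_to_old_alt (sentence : String) : String :=
  String.ofList (tokB ((PySem.Str.lower sentence).toList))

-- ===== PRECONDITION & SPEC =====
def Spec_new_to_old (sentence : String) (out : String) : Prop := out = new_to_old_alt sentence
instance (sentence : String) (out : String) : Decidable (Spec_new_to_old sentence out) := by unfold Spec_new_to_old; infer_instance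

-- ===== CLAIM (what is proved, stated in full; the proofs are below) =====
def Claim_equal_new_to_old : Prop := ∀ (sentence : String), Dom_new_to_old sentence → Spec_new_to_old sentence (new_to_old sentence)

-- ===== LEMMAS AND PROOFS =====

theorem lookB_pair (c1 c2 : Char) : lookB tableB [c1, c2] =
    if c1 = 'n' ∧ c2 = 'y' then some ['n','j']
    else if c1 = 's' ∧ c2 = 'y' then some ['s','j']
    else if c1 = 'k' ∧ c2 = 'h' then some ['c','h'] else none := by
  simp only [tableB, lookB, List.cons.injEq, and_true, List.cons_ne_nil, and_false, if_false,
    List.nil_eq]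
  split_ifs <;> simp_all <;> tauto

theorem lookB_single (c1 : Char) : lookB tableB [c1] =
    if c1 = 'j' then some ['d','j'] else if c1 = 'u' then some ['o','e']
    else if c1 = 'c' then some ['t','j'] else if c1 = 'y' then some ['j'] else none := by
  simp only [tableB, lookB, List.cons.injEq, and_true, List.cons_ne_nil, and_false, if_false]
  split_ifs <;> first | rfl | simp_all | tauto

theorem tokB_cons (c : Char) (t : List Char)
    (h : ∀ c2, t.head? = some c2 → lookB tableB [c, c2] = none) :
    tokB (c :: t) = (lookB tableB [c]).getD [c] ++ tokB t := by
  cases t with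
  | nil => simp [tokB]
  | cons c2 rest => rw [tokB, h c2 rfl]
theorem cast_add_one (i : Nat) : ((i : Int) + 1) = ((i + 1 : Nat) : Int) := by push_cast; ring
theorem cast_sub_one (i : Nat) (h : 1 ≤ i) : ((i : Int) - 1) = ((i - 1 : Nat) : Int) := by
  omega

theorem pieceA_j (s : List Char) (i : Nat) (h : s[i]?.getD ' ' = 'j') :
    pieceA s (i : Int) = ['d','j'] := by
  unfold pieceA; simp [h]

theorem pieceA_u (s : List Char) (i : Nat) (h : s[i]?.getD ' ' = 'u') :
    pieceA s (i : Int) = ['o','e'] := by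
  unfold pieceA; simp [h]

theorem pieceA_c (s : List Char) (i : Nat) (h : s[i]?.getD ' ' = 'c') :
    pieceA s (i : Int) = ['t','j'] := by
  unfold pieceA; simp [h]

theorem pyGetD_succ (s : List Char) (i : Nat) :
    PySem.List.pyGetD s ((i : Int) + 1) ' ' = s[i+1]?.getD ' ' := by
  rw [cast_add_one, PySem.List.pyGetD_natCast]; simp [List.getD]

theorem pyGetD_pred (s : List Char) (i : Nat) (h : 1 ≤ i) :
    PySem.List.pyGetD s ((i : Int) - 1) ' ' = s[i-1]?.getD ' ' := by
  rw [cast_sub_one i h, PySem.List.pyGetD_natCast]; simp [List.getD]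

theorem pieceA_n_pair (s : List Char) (i : Nat) (h : s[i]?.getD ' ' = 'n')
    (h2 : i + 1 < s.length) (h3 : s[i+1]?.getD ' ' = 'y') :
    pieceA s (i : Int) = ['n','j'] := by
  have h2' : (i : Int) + 1 < (s.length : Int) := by exact_mod_cast h2
  unfold pieceA; simp [h, h2', pyGetD_succ, h3]

theorem pieceA_n_nonpair (s : List Char) (i : Nat) (h : s[i]?.getD ' ' = 'n')
    (h2 : i + 1 < s.length) (h3 : s[i+1]?.getD ' ' ≠ 'y') :
    pieceA s (i : Int) = ['n'] := by
  have h2' : (i : Int) + 1 < (s.length : Int) := by exact_mod_cast h2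
  unfold pieceA; simp [h, h2', pyGetD_succ, h3]

theorem pieceA_s_pair (s : List Char) (i : Nat) (h : s[i]?.getD ' ' = 's')
    (h2 : i + 1 < s.length) (h3 : s[i+1]?.getD ' ' = 'y') :
    pieceA s (i : Int) = ['s','j'] := by
  have h2' : (i : Int) + 1 < (s.length : Int) := by exact_mod_cast h2
  unfold pieceA; simp [h, h2', pyGetD_succ, h3]

theorem pieceA_s_nonpair (s : List Char) (i : Nat) (h : s[i]?.getD ' ' = 's')
    (h2 : i + 1 < s.length) (h3 : s[i+1]?.getD ' ' ≠ 'y') :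
    pieceA s (i : Int) = ['s'] := by
  have h2' : (i : Int) + 1 < (s.length : Int) := by exact_mod_cast h2
  unfold pieceA; simp [h, h2', pyGetD_succ, h3]

theorem pieceA_k_pair (s : List Char) (i : Nat) (h : s[i]?.getD ' ' = 'k')
    (h2 : i + 1 < s.length) (h3 : s[i+1]?.getD ' ' = 'h') :
    pieceA s (i : Int) = ['c','h'] := by
  have h2' : (i : Int) + 1 < (s.length : Int) := by exact_mod_cast h2
  unfold pieceA; simp [h, h2', pyGetD_succ, h3]

theorem pieceA_k_nonpair (s : List Char) (i : Nat) (h : s[i]?.getD ' ' = 'k')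
    (h2 : i + 1 < s.length) (h3 : s[i+1]?.getD ' ' ≠ 'h') :
    pieceA s (i : Int) = ['k'] := by
  have h2' : (i : Int) + 1 < (s.length : Int) := by exact_mod_cast h2
  unfold pieceA; simp [h, h2', pyGetD_succ, h3]

theorem pieceA_nsk_end (s : List Char) (i : Nat)
    (h : s[i]?.getD ' ' = 'n' ∨ s[i]?.getD ' ' = 's' ∨ s[i]?.getD ' ' = 'k')
    (h2 : ¬ (i + 1 < s.length)) :
    pieceA s (i : Int) = [s[i]?.getD ' '] := by
  have h2' : ¬ ((i : Int) + 1 < (s.length : Int)) := by exact_mod_cast h2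
  unfold pieceA
  rcases h with h | h | h <;> simp [h, h2']

theorem pieceA_y_skip (s : List Char) (i : Nat) (h : s[i]?.getD ' ' = 'y') (hi : 1 ≤ i)
    (hp : s[i-1]?.getD ' ' = 'n' ∨ s[i-1]?.getD ' ' = 's') :
    pieceA s (i : Int) = [] := by
  unfold pieceA
  rcases hp with hp | hp <;> simp [h, pyGetD_pred s i hi, hp, hi]

theorem pieceA_y (s : List Char) (i : Nat) (h : s[i]?.getD ' ' = 'y')
    (hp : i = 0 ∨ (s[i-1]?.getD ' ' ≠ 'n' ∧ s[i-1]?.getD ' ' ≠ 's')) :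
    pieceA s (i : Int) = ['j'] := by
  unfold pieceA
  rcases hp with hp | hp
  · subst hp; simp [h, PySem.List.pyGetD_zero, List.getD]
  · rcases Nat.eq_zero_or_pos i with hz | hpos
    · subst hz; simp [h, PySem.List.pyGetD_zero, List.getD]
    · simp [h, pyGetD_pred s i hpos, hp.1, hp.2]

theorem pieceA_h_skip (s : List Char) (i : Nat) (h : s[i]?.getD ' ' = 'h') (hi : 1 ≤ i)
    (hp : s[i-1]?.getD ' ' = 'k') :
    pieceA s (i : Int) = [] := by
  unfold pieceA; simp [h, pyGetD_pred s i hi, hp, hi]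

theorem pieceA_h (s : List Char) (i : Nat) (h : s[i]?.getD ' ' = 'h')
    (hp : i = 0 ∨ s[i-1]?.getD ' ' ≠ 'k') :
    pieceA s (i : Int) = ['h'] := by
  unfold pieceA
  rcases hp with hp | hp
  · subst hp; simp [h, PySem.List.pyGetD_zero, List.getD]
  · rcases Nat.eq_zero_or_pos i with hz | hpos
    · subst hz; simp [h, PySem.List.pyGetD_zero, List.getD]
    · simp [h, pyGetD_pred s i hpos, hp]

theorem pieceA_other (s : List Char) (i : Nat)
    (h : ∀ x ∈ (['j','u','c','n','s','y','k','h'] : List Char), s[i]?.getD ' ' ≠ x) :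
    pieceA s (i : Int) = [s[i]?.getD ' '] := by
  simp only [List.mem_cons, forall_eq_or_imp] at h
  obtain ⟨h1, h2, h3, h4, h5, h6, h7, h8, -⟩ := h
  unfold pieceA; simp [h1, h2, h3, h4, h5, h6, h7, h8]
def trig (s : List Char) (i : Nat) : Prop :=
  1 ≤ i ∧ ((s[i]?.getD ' ' = 'y' ∧ (s[i-1]?.getD ' ' = 'n' ∨ s[i-1]?.getD ' ' = 's'))
          ∨ (s[i]?.getD ' ' = 'h' ∧ s[i-1]?.getD ' ' = 'k'))

theorem range'_cons_of_lt (i n : Nat) (h : i < n) :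
    List.range' i (n - i) = i :: List.range' (i+1) (n - (i+1)) := by
  have : n - i = (n - (i+1)) + 1 := by omega
  rw [this, List.range'_succ]

theorem main_lemma (s : List Char) :
    ∀ k i, i ≤ s.length → k = s.length - i → ¬ trig s i →
      ((List.range' i (s.length - i)).map (fun j : Nat => pieceA s (j : Int))).flatten
        = tokB (s.drop i) := by
  intro k
  induction k using Nat.strong_induction_on with
  | _ k IH =>
  intro i hi hk htrig
  rcases Nat.eq_or_lt_of_le hi with heq | hlt
  · rw [heq]; simp [List.drop_length, tokB]
  · have hdrop : s.drop i = s[i] :: s.drop (i+1) := List.drop_eq_getElem_cons hlt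
    have hci : s[i]?.getD ' ' = s[i] := by simp [List.getElem?_eq_getElem hlt]
    set c := s[i] with hc
    -- facts about the next position, as Option.getD
    have hnext : ∀ c2, (s.drop (i+1)).head? = some c2 → s[i+1]?.getD ' ' = c2 := by
      intro c2 hh; rw [List.head?_drop] at hh; simp [hh]
    by_cases hny : (c = 'n' ∨ c = 's') ∧ i + 1 < s.length ∧ s[i+1]?.getD ' ' = 'y'
    · -- digraph ny / sy
      obtain ⟨hcs, h2, h3⟩ := hny
      have hdrop2 : s.drop (i+1) = s[i+1] :: s.drop (i+2) := List.drop_eq_getElem_cons h2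
      have h3' : s[i+1] = 'y' := by
        have := List.getElem?_eq_getElem h2; rw [this] at h3; simpa using h3
      have hr : List.range' i (s.length - i)
          = i :: (i+1) :: List.range' (i+2) (s.length - (i+2)) := by
        rw [range'_cons_of_lt i _ hlt, range'_cons_of_lt (i+1) _ h2]
      have hskip : pieceA s ((i+1 : Nat) : Int) = [] := by
        apply pieceA_y_skip s (i+1) (by simp [List.getElem?_eq_getElem h2, h3']) (by omega)
        simp only [Nat.add_sub_cancel]
        rcases hcs with h | h <;> rw [hci, h] <;> simp
      have hrec : ((List.range' (i+2) (s.length - (i+2))).map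
            (fun j : Nat => pieceA s (j : Int))).flatten = tokB (s.drop (i+2)) := by
        apply IH (s.length - (i+2)) (by omega) (i+2) (by omega) rfl
        rintro ⟨-, ⟨-, hp⟩ | ⟨-, hp⟩⟩ <;>
          · have e : i + 2 - 1 = i + 1 := rfl
            rw [e, List.getElem?_eq_getElem h2, Option.getD_some, h3'] at hp
            rcases hp with hp | hp <;> exact absurd hp (by decide)
      rcases hcs with hcv | hcv
      · rw [hr]; simp only [List.map_cons, List.flatten_cons]
        rw [pieceA_n_pair s i (by rw [hci, hcv]) h2 h3, hskip, hrec,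
          hdrop, hdrop2, hcv, h3']
        rw [tokB, lookB_pair]
        simp
      · rw [hr]; simp only [List.map_cons, List.flatten_cons]
        rw [pieceA_s_pair s i (by rw [hci, hcv]) h2 h3, hskip, hrec,
          hdrop, hdrop2, hcv, h3']
        rw [tokB, lookB_pair]
        simp
    · by_cases hkh : c = 'k' ∧ i + 1 < s.length ∧ s[i+1]?.getD ' ' = 'h'
      · -- digraph kh
        obtain ⟨hcv, h2, h3⟩ := hkh
        have hdrop2 : s.drop (i+1) = s[i+1] :: s.drop (i+2) := List.drop_eq_getElem_cons h2
        have h3' : s[i+1] = 'h' := by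
          have := List.getElem?_eq_getElem h2; rw [this] at h3; simpa using h3
        have hr : List.range' i (s.length - i)
            = i :: (i+1) :: List.range' (i+2) (s.length - (i+2)) := by
          rw [range'_cons_of_lt i _ hlt, range'_cons_of_lt (i+1) _ h2]
        have hskip : pieceA s ((i+1 : Nat) : Int) = [] := by
          apply pieceA_h_skip s (i+1) (by simp [List.getElem?_eq_getElem h2, h3']) (by omega)
          simp only [Nat.add_sub_cancel]; rw [hci, hcv]
        have hrec : ((List.range' (i+2) (s.length - (i+2))).map
              (fun j : Nat => pieceA s (j : Int))).flatten = tokB (s.drop (i+2)) := by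
          apply IH (s.length - (i+2)) (by omega) (i+2) (by omega) rfl
          rintro ⟨-, ⟨-, hp⟩ | ⟨-, hp⟩⟩ <;>
            · have e : i + 2 - 1 = i + 1 := rfl
              rw [e, List.getElem?_eq_getElem h2, Option.getD_some, h3'] at hp
              rcases hp with hp | hp <;> exact absurd hp (by decide)
        rw [hr]; simp only [List.map_cons, List.flatten_cons]
        rw [pieceA_k_pair s i (by rw [hci, hcv]) h2 h3, hskip, hrec,
          hdrop, hdrop2, hcv, h3']
        rw [tokB, lookB_pair]
        simp
      · -- single step
        have hpairnone : ∀ c2, (s.drop (i+1)).head? = some c2 → lookB tableB [c, c2] = none := by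
          intro c2 hh
          have hv := hnext c2 hh
          have hlen : i + 1 < s.length := by
            by_contra hle
            rw [List.head?_drop, List.getElem?_eq_none (by omega)] at hh; simp at hh
          rw [lookB_pair]
          have : ¬ (c = 'n' ∧ c2 = 'y') ∧ ¬ (c = 's' ∧ c2 = 'y') ∧ ¬ (c = 'k' ∧ c2 = 'h') := by
            refine ⟨?_, ?_, ?_⟩ <;> rintro ⟨e1, e2⟩
            · exact hny ⟨Or.inl e1, hlen, by rw [hv, e2]⟩
            · exact hny ⟨Or.inr e1, hlen, by rw [hv, e2]⟩
            · exact hkh ⟨e1, hlen, by rw [hv, e2]⟩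
          simp [this.1, this.2.1, this.2.2]
        have htrig1 : ¬ trig s (i+1) := by
          rintro ⟨-, ⟨hy, hp⟩ | ⟨hy, hp⟩⟩ <;> simp only [Nat.add_sub_cancel] at hp <;>
            rw [hci] at hp
          · rcases hp with hp | hp
            · exact hny ⟨Or.inl hp, by_contra fun hl => by
                rw [List.getElem?_eq_none (by omega)] at hy; simp at hy, hy⟩
            · exact hny ⟨Or.inr hp, by_contra fun hl => by
                rw [List.getElem?_eq_none (by omega)] at hy; simp at hy, hy⟩
          · exact hkh ⟨hp, by_contra fun hl => by
              rw [List.getElem?_eq_none (by omega)] at hy; simp at hy, hy⟩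
        have hrec : ((List.range' (i+1) (s.length - (i+1))).map
              (fun j : Nat => pieceA s (j : Int))).flatten = tokB (s.drop (i+1)) :=
          IH (s.length - (i+1)) (by omega) (i+1) (by omega) rfl htrig1
        have hpiece : pieceA s (i : Int) = (lookB tableB [c]).getD [c] := by
          by_cases h1 : c = 'j'
          · rw [pieceA_j s i (by rw [hci, h1]), h1, lookB_single]; simp
          · by_cases h2 : c = 'u'
            · rw [pieceA_u s i (by rw [hci, h2]), h2, lookB_single]; simp
            · by_cases h3 : c = 'c'
              · rw [pieceA_c s i (by rw [hci, h3]), h3, lookB_single]; simp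
              · by_cases h4 : c = 'n'
                · by_cases hl : i + 1 < s.length
                  · have hne : s[i+1]?.getD ' ' ≠ 'y' := fun hv => hny ⟨Or.inl h4, hl, hv⟩
                    rw [pieceA_n_nonpair s i (by rw [hci, h4]) hl hne, h4, lookB_single]; simp
                  · rw [pieceA_nsk_end s i (by rw [hci]; tauto) hl, hci, h4, lookB_single]; simp
                · by_cases h5 : c = 's'
                  · by_cases hl : i + 1 < s.length
                    · have hne : s[i+1]?.getD ' ' ≠ 'y' := fun hv => hny ⟨Or.inr h5, hl, hv⟩
                      rw [pieceA_s_nonpair s i (by rw [hci, h5]) hl hne, h5, lookB_single]; simp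
                    · rw [pieceA_nsk_end s i (by rw [hci]; tauto) hl, hci, h5, lookB_single]; simp
                  · by_cases h6 : c = 'y'
                    · have hp : i = 0 ∨ (s[i-1]?.getD ' ' ≠ 'n' ∧ s[i-1]?.getD ' ' ≠ 's') := by
                        rcases Nat.eq_zero_or_pos i with hz | hpos
                        · exact Or.inl hz
                        · refine Or.inr ⟨?_, ?_⟩ <;> intro hv <;>
                            exact htrig ⟨hpos, Or.inl ⟨by rw [hci, h6], by rw [hv]; tauto⟩⟩
                      rw [pieceA_y s i (by rw [hci, h6]) hp, h6, lookB_single]; simp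
                    · by_cases h7 : c = 'k'
                      · by_cases hl : i + 1 < s.length
                        · have hne : s[i+1]?.getD ' ' ≠ 'h' := fun hv => hkh ⟨h7, hl, hv⟩
                          rw [pieceA_k_nonpair s i (by rw [hci, h7]) hl hne, h7, lookB_single]; simp
                        · rw [pieceA_nsk_end s i (by rw [hci]; tauto) hl, hci, h7, lookB_single]; simp
                      · by_cases h8 : c = 'h'
                        · have hp : i = 0 ∨ s[i-1]?.getD ' ' ≠ 'k' := by
                            rcases Nat.eq_zero_or_pos i with hz | hpos
                            · exact Or.inl hz
                            · exact Or.inr fun hv =>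
                                htrig ⟨hpos, Or.inr ⟨by rw [hci, h8], hv⟩⟩
                          rw [pieceA_h s i (by rw [hci, h8]) hp, h8, lookB_single]; simp
                        · rw [pieceA_other s i (by rw [hci]; simp; tauto), hci, lookB_single]
                          simp [h1, h2, h3, h6]
        rw [range'_cons_of_lt i _ hlt]
        simp only [List.map_cons, List.flatten_cons]
        rw [hpiece, hrec, hdrop, tokB_cons c _ hpairnone]
theorem new_to_old_spec_aux (s : List Char) :
    ((PySem.List.pyRange 0 (s.length : Int) 1).foldl
      (fun acc i => acc ++ [pieceA s i]) ([] : List (List Char))).flatten = tokB s := by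
  rw [PySem.List.foldl_append_singleton_eq_map]
  have hr : PySem.List.pyRange 0 (s.length : Int) 1 = (List.range' 0 s.length).map (fun j : Nat => (j : Int)) := by
    rw [PySem.List.pyRange_zero_natCast]
    simp [List.range_eq_range']
  rw [hr, List.map_map]
  have := main_lemma s (s.length) 0 (by omega) (by omega) (by rintro ⟨h, -⟩; omega)
  simpa using this

-- ===== VERDICT (by name: the statement is the Claim_ definition above) =====
theorem new_to_old_spec : Claim_equal_new_to_old := by
  intro sentence _
  unfold Spec_new_to_old new_to_old new_to_old_alt
  simp only [new_to_old_spec_aux]
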